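-- pv_equiv track=rewrite | github.com/jst10/aoc | 2024/main/7/main.py | get_all_solutions
-- ===== SOURCE A (Python) =====
-- def get_all_solutions(numbers,max_limit):
--         if numbers[0]>max_limit:
--              return set()
--         if len(numbers)==1:
--             return set([numbers[0]])
--         r=set()
--         cn1=[n for n in numbers[1:]]
--         cn1[0]=numbers[0]+numbers[1]
--         r1=get_all_solutions(cn1,max_limit)
--         cn2=[n for n in numbers[1:]]
--         cn2[0]=numbers[0]*numbers[1]
--         r2=get_all_solutions(cn2,max_limit)
--         cn3=[n for n in numbers[1:]]
--         cn3[0]=int(str(numbers[0])+str(numbers[1]))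
--         r3=get_all_solutions(cn3,max_limit)
--         return r.union(r1).union(r2).union(r3)
-- ===== SOURCE B (Python) =====
-- def get_all_solutions(numbers, max_limit):
--     # Iterative DP over the set of reachable accumulator values (pruned at > max_limit),
--     # instead of A's exponential 3-way recursion.
--     states = {numbers[0]} if numbers[0] <= max_limit else set()
--     for b in numbers[1:]:
--         nxt = set()
--         for a in states:
--             for v in (a + b, a * b, int(str(a) + str(b))):
--                 if v <= max_limit:
--                     nxt.add(v)
--         states = nxt
--     return states
-- ===== Notes on version B (the rewrite author's own statement) =====
-- stated objective: faster
-- what changed: A explores all operator choices by 3-way recursion on the remaining list (exponential tree of calls); B is an iterative left-to-right DP keeping one deduplicated set of reachable accumulator values per position, pruning values > max_limit, so duplicate intermediate states are merged instead of re-expanded.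
-- outside the precondition, e.g. on get_all_solutions([1, 1000, -1], 5): A returns set(), B returns set()
import Mathlib
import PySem

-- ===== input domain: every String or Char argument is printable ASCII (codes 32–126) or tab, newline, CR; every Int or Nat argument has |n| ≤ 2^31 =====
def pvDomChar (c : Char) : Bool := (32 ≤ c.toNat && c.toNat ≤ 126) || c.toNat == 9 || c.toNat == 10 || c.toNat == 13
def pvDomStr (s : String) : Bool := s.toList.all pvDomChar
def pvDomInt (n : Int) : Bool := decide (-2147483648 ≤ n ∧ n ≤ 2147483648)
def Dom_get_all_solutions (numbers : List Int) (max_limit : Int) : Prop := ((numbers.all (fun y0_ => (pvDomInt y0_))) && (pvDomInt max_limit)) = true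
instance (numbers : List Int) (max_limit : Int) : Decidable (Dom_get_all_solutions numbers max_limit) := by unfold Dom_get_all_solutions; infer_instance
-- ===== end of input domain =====

-- B replaces A's exponential 3-way recursion by an iterative DP over the set of reachable
-- accumulator values (duplicate states merged, values > max_limit pruned); objective: faster.

-- ===== PORT A =====
-- int(str(a)+str(b)) : exact via PySem.Int.toStr / ofStr?; `.getD 0` only totalises the
-- ValueError case (b < 0), which Pre_ excludes.
def pyConcat (a b : Int) : Int :=
  (PySem.Int.ofStr? (PySem.Int.toStr a ++ PySem.Int.toStr b)).getD 0

-- literal transliteration of A; `numbers = []` (Python IndexError) is excluded by Pre_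
def get_all_solutions (numbers : List Int) (max_limit : Int) : List Int :=
  match numbers with
  | [] => []
  | x :: tl =>
    if x > max_limit then []
    else
      match tl with
      | [] => [x]
      | y :: rest =>
        let r : PySem.Set Int := PySem.Set.empty
        let r1 := get_all_solutions ((x + y) :: rest) max_limit
        let r2 := get_all_solutions ((x * y) :: rest) max_limit
        let r3 := get_all_solutions (pyConcat x y :: rest) max_limit
        PySem.Set.union (PySem.Set.union (PySem.Set.union r r1) r2) r3
termination_by numbers.length
decreasing_by all_goals simp

-- ===== PORT B =====
def get_all_solutions_alt (numbers : List Int) (max_limit : Int) : List Int :=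
  match numbers with
  | [] => []   -- Python raises IndexError here; excluded by Pre_
  | x :: tl =>
    let init : PySem.Set Int := if x ≤ max_limit then [x] else PySem.Set.empty
    tl.foldl (fun states b =>
      states.foldl (fun nxt a =>
        [a + b, a * b, pyConcat a b].foldl (fun nxt v =>
          if v ≤ max_limit then PySem.Set.add nxt v else nxt) nxt)
        PySem.Set.empty) init

-- ===== PRECONDITION & SPEC =====
-- Pre_ excludes the empty list (A raises IndexError on numbers[0]) and, unless the head is
-- already pruned (> max_limit, where A returns set() at once), lists with a negative element
-- after the first, on which the int(str(a)+str(b)) step raises ValueError whenever the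
-- recursion reaches it (it returns set() only when every path is pruned before reaching it).
def Pre_get_all_solutions (numbers : List Int) (max_limit : Int) : Prop :=
  numbers ≠ [] ∧ ((∃ h ∈ numbers.head?, max_limit < h) ∨ ∀ x ∈ numbers.tail, 0 ≤ x)
instance (numbers : List Int) (max_limit : Int) : Decidable (Pre_get_all_solutions numbers max_limit) := by unfold Pre_get_all_solutions; infer_instance

def pvWitness_get_all_solutions : List Int × Int := ([6, 4, 2, 3], 100)

def Spec_get_all_solutions (numbers : List Int) (max_limit : Int) (out : List Int) : Prop := out = get_all_solutions_alt numbers max_limit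
instance (numbers : List Int) (max_limit : Int) (out : List Int) : Decidable (Spec_get_all_solutions numbers max_limit out) := by unfold Spec_get_all_solutions; infer_instance

-- ===== CLAIM (what is proved, stated in full; the proofs are below) =====
def Claim_equal_get_all_solutions : Prop := ∀ (numbers : List Int) (max_limit : Int), Dom_get_all_solutions numbers max_limit → Pre_get_all_solutions numbers max_limit → Spec_get_all_solutions numbers max_limit (get_all_solutions numbers max_limit)

-- ===== LEMMAS AND PROOFS =====

-- proof-only helpers: one DP step over the flattened children list
def pvCh (b a : Int) : List Int := [a + b, a * b, pyConcat a b]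

def pvStepf (M : Int) (d : PySem.Set Int) (v : Int) : PySem.Set Int :=
  if v ≤ M then PySem.Set.add d v else d

def pvStep (M b : Int) (S : List Int) : List Int :=
  (S.flatMap (pvCh b)).foldl (pvStepf M) PySem.Set.empty

def pvF (M : Int) (rest : List Int) (a : Int) : List Int :=
  get_all_solutions (a :: rest) M

def pvH (M : Int) (rest : List Int) (S : List Int) : List Int :=
  S.foldl (fun acc a => PySem.Set.update acc (pvF M rest a)) []

theorem pvAltEq (x M : Int) (tl : List Int) :
    get_all_solutions_alt (x :: tl) M
      = tl.foldl (fun st b => pvStep M b st) (if x ≤ M then [x] else []) := by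
  simp only [get_all_solutions_alt, pvStep, pvCh, List.foldl_flatMap,
    PySem.Set.empty]
  rfl

theorem pvF_gt {M v : Int} (rest : List Int) (h : M < v) : pvF M rest v = [] := by
  unfold pvF get_all_solutions
  simp [h]

theorem pvF_base {M a : Int} (h : a ≤ M) : pvF M [] a = [a] := by
  unfold pvF get_all_solutions
  simp [not_lt.mpr h]

theorem pvF_cons {M a : Int} (b : Int) (rest : List Int) (h : a ≤ M) :
    pvF M (b :: rest) a =
      PySem.Set.update (PySem.Set.update (PySem.Set.update [] (pvF M rest (a + b)))
        (pvF M rest (a * b))) (pvF M rest (pyConcat a b)) := by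
  unfold pvF
  rw [get_all_solutions]
  simp [not_lt.mpr h, PySem.Set.union, PySem.Set.empty]

theorem pvF_nodup (ns : List Int) (M : Int) : (get_all_solutions ns M).Nodup := by
  match ns with
  | [] => simp [get_all_solutions]
  | [x] =>
    rw [get_all_solutions]; split <;> simp
  | x :: y :: rest =>
    rw [get_all_solutions]
    split
    · simp
    · exact PySem.Set.nodup_update _ _ (PySem.Set.nodup_update _ _
        (PySem.Set.nodup_update _ _ List.nodup_nil))

theorem pvUpdate_of_subset {s : PySem.Set Int} {t : List Int}
    (h : ∀ y ∈ t, y ∈ s) : PySem.Set.update s t = s := by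
  rw [PySem.Set.update_eq_append_filter]
  have : (PySem.Set.ofList t).filter (fun y => !PySem.Set.contains s y) = [] := by
    rw [List.filter_eq_nil_iff]
    intro a ha
    have := h a ((PySem.Set.mem_ofList t a).1 ha)
    simp [this]
  rw [this, List.append_nil]

theorem pvUpdate_ofList (X : PySem.Set Int) (L : List Int) :
    PySem.Set.update X (PySem.Set.ofList L) = PySem.Set.update X L := by
  rw [PySem.Set.update_eq_append_filter, PySem.Set.update_eq_append_filter,
    PySem.Set.ofList_ofList]

theorem pvUpdate_filter (p : Int → Bool) :
    ∀ (L : List Int) (Y : PySem.Set Int), (∀ x ∈ L, p x = false → x ∈ Y) →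
      PySem.Set.update Y (L.filter p) = PySem.Set.update Y L := by
  intro L
  induction L with
  | nil => intro Y _; rfl
  | cons x L ih =>
    intro Y h
    by_cases hp : p x = true
    · rw [List.filter_cons_of_pos hp, PySem.Set.update_cons, PySem.Set.update_cons]
      exact ih _ (fun z hz hf => ((PySem.Set.mem_add Y x z).2 (Or.inl (h z (List.mem_cons_of_mem _ hz) hf))))
    · have hx : x ∈ Y := h x List.mem_cons_self (by simpa using hp)
      rw [List.filter_cons_of_neg (by simpa using hp), PySem.Set.update_cons,
        PySem.Set.add_of_mem hx]
      exact ih _ (fun z hz hf => h z (List.mem_cons_of_mem _ hz) hf)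

theorem pvUpdate_update (X s : PySem.Set Int) (L : List Int) :
    PySem.Set.update X (PySem.Set.update s L)
      = PySem.Set.update (PySem.Set.update X s) L := by
  rw [PySem.Set.update_eq_append_filter s L, PySem.Set.update_append,
    ← pvUpdate_ofList (PySem.Set.update X s) L]
  exact pvUpdate_filter _ _ _
    (fun z _ hf => (PySem.Set.mem_update X s z).2 (Or.inr ((PySem.Set.contains_iff s z).1 (by simpa using hf))))

theorem pvNodup_stepfold (M : Int) :
    ∀ (L : List Int) (D : PySem.Set Int), D.Nodup → (L.foldl (pvStepf M) D).Nodup := by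
  intro L
  induction L with
  | nil => intro D h; exact h
  | cons v L ih =>
    intro D h
    simp only [List.foldl_cons]
    apply ih
    unfold pvStepf
    split
    · exact PySem.Set.nodup_add _ _ h
    · exact h

theorem pvLe_stepfold (M : Int) :
    ∀ (L : List Int) (D : PySem.Set Int), (∀ a ∈ D, a ≤ M) →
      ∀ a ∈ L.foldl (pvStepf M) D, a ≤ M := by
  intro L
  induction L with
  | nil => intro D h; exact h
  | cons v L ih =>
    intro D h
    simp only [List.foldl_cons]
    apply ih
    intro a ha
    unfold pvStepf at ha
    split at ha
    · rcases (PySem.Set.mem_add D v a).1 ha with h1 | h1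
      · exact h a h1
      · subst h1; assumption
    · exact h a ha

theorem pvKey (M : Int) (rest : List Int) :
    ∀ (L D acc : List Int),
      (∀ v ∈ D, ∀ y ∈ pvF M rest v, y ∈ acc) →
      ∃ E, L.foldl (pvStepf M) D = D ++ E ∧
        L.foldl (fun a v => PySem.Set.update a (pvF M rest v)) acc
          = E.foldl (fun a v => PySem.Set.update a (pvF M rest v)) acc := by
  intro L
  induction L with
  | nil => intro D acc _; exact ⟨[], by simp, rfl⟩
  | cons v L ih =>
    intro D acc h
    by_cases hv : v ≤ M
    · by_cases hm : v ∈ D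
      · have h1 : pvStepf M D v = D := by
          unfold pvStepf; rw [if_pos hv, PySem.Set.add_of_mem hm]
        have h2 : PySem.Set.update acc (pvF M rest v) = acc :=
          pvUpdate_of_subset (h v hm)
        simpa only [List.foldl_cons, h1, h2] using ih D acc h
      · have h1 : pvStepf M D v = D ++ [v] := by
          unfold pvStepf; rw [if_pos hv, PySem.Set.add_of_not_mem hm]
        have h3 : ∀ w ∈ D ++ [v], ∀ y ∈ pvF M rest w,
            y ∈ PySem.Set.update acc (pvF M rest v) := by
          intro w hw y hy
          rcases List.mem_append.1 hw with hw | hw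
          · exact (PySem.Set.mem_update _ _ _).2 (Or.inl (h w hw y hy))
          · simp only [List.mem_singleton] at hw
            subst hw
            exact (PySem.Set.mem_update _ _ _).2 (Or.inr hy)
        obtain ⟨E, hE1, hE2⟩ := ih (D ++ [v]) (PySem.Set.update acc (pvF M rest v)) h3
        refine ⟨v :: E, ?_, ?_⟩
        · simp only [List.foldl_cons, h1, hE1]; simp
        · simp only [List.foldl_cons, hE2]
    · have h1 : pvStepf M D v = D := by unfold pvStepf; rw [if_neg hv]
      have h2 : PySem.Set.update acc (pvF M rest v) = acc := by
        rw [pvF_gt rest (not_le.1 hv), PySem.Set.update_nil]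
      simpa only [List.foldl_cons, h1, h2] using ih D acc h

theorem pvMain (M : Int) :
    ∀ (rest S : List Int), S.Nodup → (∀ a ∈ S, a ≤ M) →
      rest.foldl (fun st b => pvStep M b st) S = pvH M rest S := by
  intro rest
  induction rest with
  | nil =>
    intro S hnd hle
    unfold pvH
    rw [PySem.List.foldl_congr_mem S _ (fun acc a => PySem.Set.add acc a) []
      (by
        intro acc a ha
        rw [pvF_base (hle a ha), PySem.Set.update_cons, PySem.Set.update_nil])]
    rw [← PySem.Set.ofList_eq_foldl, PySem.Set.ofList_eq_self_of_nodup S hnd]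
    rfl
  | cons b rest ih =>
    intro S hnd hle
    simp only [List.foldl_cons]
    have hstep_nd : (pvStep M b S).Nodup :=
      pvNodup_stepfold M _ _ List.nodup_nil
    have hstep_le : ∀ a ∈ pvStep M b S, a ≤ M :=
      pvLe_stepfold M _ _ (by simp [PySem.Set.empty])
    rw [ih (pvStep M b S) hstep_nd hstep_le]
    -- now show pvH M (b :: rest) S = pvH M rest (pvStep M b S)
    unfold pvH
    rw [PySem.List.foldl_congr_mem S _
      (fun acc a => (pvCh b a).foldl (fun acc v => PySem.Set.update acc (pvF M rest v)) acc) []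
      (by
        intro acc a ha
        rw [pvF_cons b rest (hle a ha)]
        rw [pvUpdate_update, pvUpdate_update, pvUpdate_update, PySem.Set.update_nil]
        simp [pvCh])]
    rw [← List.foldl_flatMap]
    obtain ⟨E, hE1, hE2⟩ := pvKey M rest (S.flatMap (pvCh b)) [] [] (by simp)
    have hE : pvStep M b S = E := by
      simpa [pvStep, PySem.Set.empty] using hE1
    rw [hE2, hE]

-- ===== VERDICT (by name: the statement is the Claim_ definition above) =====
theorem get_all_solutions_spec : Claim_equal_get_all_solutions := by
  intro numbers M _ hpre
  obtain ⟨hne, _⟩ := hpre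
  match numbers with
  | [] => exact absurd rfl hne
  | x :: tl =>
    show get_all_solutions (x :: tl) M = get_all_solutions_alt (x :: tl) M
    rw [pvAltEq]
    by_cases hx : x ≤ M
    · rw [if_pos hx, pvMain M tl [x] (List.nodup_singleton x) (by simpa using hx)]
      unfold pvH
      simp only [List.foldl_cons, List.foldl_nil]
      rw [PySem.Set.update_nil_left]
      show get_all_solutions (x :: tl) M = PySem.Set.ofList (get_all_solutions (x :: tl) M)
      rw [PySem.Set.ofList_eq_self_of_nodup _ (pvF_nodup _ M)]
    · rw [if_neg hx, pvMain M tl [] List.nodup_nil (by simp)]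
      unfold pvH
      simp only [List.foldl_nil]
      exact pvF_gt tl (not_le.1 hx)
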